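-- pv_equiv track=rewrite | github.com/corradomio/python_projects | check_cayley/ulam_distance.py | ulam_distance
-- ===== SOURCE A (Python) =====
-- from bisect import bisect_left
--
-- def ulam_distance(perm1, perm2):
--     """
--     Computes the Ulam distance between two permutations.
--
--     Args:
--         perm1 (list): The first permutation as a list of integers.
--         perm2 (list): The second permutation as a list of integers.
--
--     Returns:
--         int: The Ulam distance (minimum number of deletions required).
--     """
--     if sorted(perm1) != sorted(perm2):
--         raise ValueError("Input permutations must contain the same elements.")
--
--     # Map perm1 to perm2's indices to create an isomorphic subsequence problem
--     index_map = {value: i for i, value in enumerate(perm2)}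
--     mapped_perm = [index_map[value] for value in perm1]
--
--     # Find the length of the longest increasing subsequence (LIS)
--     lis = []
--     for value in mapped_perm:
--         pos = bisect_left(lis, value)
--         if pos == len(lis):
--             lis.append(value)
--         else:
--             lis[pos] = value
--
--     # Ulam distance = length of permutation - length of LIS
--     return len(perm1) - len(lis)
-- ===== SOURCE B (Python) =====
-- def ulam_distance(perm1, perm2):
--     """Ulam distance via the classic O(n^2) LIS dynamic program (per-index best
--     lengths) instead of patience sorting with binary search."""
--     if sorted(perm1) != sorted(perm2):
--         raise ValueError("Input permutations must contain the same elements.")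
--
--     index_map = {value: i for i, value in enumerate(perm2)}
--     mapped_perm = [index_map[value] for value in perm1]
--
--     dp = []
--     for v in mapped_perm:
--         best = 0
--         for u, d in zip(mapped_perm, dp):
--             if u < v and best < d:
--                 best = d
--         dp.append(best + 1)
--
--     return len(perm1) - max(dp, default=0)
-- ===== Notes on version B (the rewrite author's own statement) =====
-- stated objective: alternative
-- what changed: The patience-sorting LIS loop (bisect_left into a tails list) is replaced by the classic O(n^2) per-index dynamic program dp[i] = 1 + max dp[j] over j<i with mapped[j] < mapped[i], answering len - max(dp, default=0); validation and index mapping are unchanged, and Pre_ excludes only the inputs where both A and B raise ValueError (sorted(perm1) != sorted(perm2)).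
import Mathlib
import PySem

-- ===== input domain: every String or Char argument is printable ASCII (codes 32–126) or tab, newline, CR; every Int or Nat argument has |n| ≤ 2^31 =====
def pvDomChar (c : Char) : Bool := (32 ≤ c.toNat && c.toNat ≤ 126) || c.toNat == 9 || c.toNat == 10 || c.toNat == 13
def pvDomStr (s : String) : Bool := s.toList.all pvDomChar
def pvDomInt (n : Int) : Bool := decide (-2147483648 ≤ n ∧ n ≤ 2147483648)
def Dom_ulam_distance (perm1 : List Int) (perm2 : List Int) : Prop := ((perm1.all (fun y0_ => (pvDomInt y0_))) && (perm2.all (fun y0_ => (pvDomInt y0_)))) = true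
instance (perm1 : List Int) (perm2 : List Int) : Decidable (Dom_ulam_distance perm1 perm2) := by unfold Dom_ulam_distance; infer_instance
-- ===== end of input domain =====

-- B replaces A's patience-sorting LIS (bisect_left into a tails list) by the classic
-- per-index O(n^2) LIS dynamic program; validation and index mapping are unchanged
-- (objective: alternative algorithm, same results).

-- ===== PORT A =====
-- index_map = {value: i for i, value in enumerate(perm2)}
def pvIndexMapA (perm2 : List Int) : PySem.Dict Int Int :=
  (PySem.List.enumerate perm2 0).foldl (fun d p => d.insert p.2 p.1) PySem.Dict.empty

-- mapped_perm = [index_map[value] for value in perm1]  (under Pre_ every lookup hits;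
-- the default 0 is never used on inputs satisfying Pre_ulam_distance)
def pvMappedA (perm1 : List Int) (perm2 : List Int) : List Int :=
  perm1.map (fun v => ((pvIndexMapA perm2).get? v).getD 0)

-- one iteration of A's patience loop: pos = bisect_left(lis, value); append or replace
def pvStepA (lis : List Int) (v : Int) : List Int :=
  let pos := PySem.List.bisectLeft lis v
  if pos = lis.length then lis ++ [v] else lis.set pos v

def ulam_distance (perm1 : List Int) (perm2 : List Int) : Int :=
  let mapped_perm := pvMappedA perm1 perm2
  let lis := mapped_perm.foldl pvStepA []
  (perm1.length : Int) - (lis.length : Int)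

-- ===== PORT B =====
def pvIndexMapB (perm2 : List Int) : PySem.Dict Int Int :=
  (PySem.List.enumerate perm2 0).foldl (fun d p => d.insert p.2 p.1) PySem.Dict.empty

def pvMappedB (perm1 : List Int) (perm2 : List Int) : List Int :=
  perm1.map (fun v => ((pvIndexMapB perm2).get? v).getD 0)

-- best = running max of d over earlier pairs (u, d) with u < v (0 if none)
def pvBestB (pairs : List (Int × Int)) (v : Int) : Int :=
  pairs.foldl (fun best p => if p.1 < v ∧ best < p.2 then p.2 else best) 0

-- one iteration of B's dp loop: dp.append(best + 1), scanning zip(mapped_perm, dp)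
def pvStepB (m : List Int) (dp : List Int) (v : Int) : List Int :=
  dp ++ [pvBestB (m.zip dp) v + 1]

def ulam_distance_alt (perm1 : List Int) (perm2 : List Int) : Int :=
  let mapped_perm := pvMappedB perm1 perm2
  let dp := mapped_perm.foldl (pvStepB mapped_perm) []
  (perm1.length : Int) -
    (match PySem.List.max? dp (fun x => x) with
     | some x => x
     | none => 0)

-- ===== PRECONDITION & SPEC =====
-- Pre_ excludes exactly the inputs on which A raises ValueError (sorted(perm1) != sorted(perm2));
-- B raises the same ValueError there.
def Pre_ulam_distance (perm1 : List Int) (perm2 : List Int) : Prop :=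
  PySem.List.sorted perm1 (fun x => x) false = PySem.List.sorted perm2 (fun x => x) false
instance (perm1 : List Int) (perm2 : List Int) : Decidable (Pre_ulam_distance perm1 perm2) := by
  unfold Pre_ulam_distance; infer_instance

def pvWitness_ulam_distance : List Int × List Int := ([2, 1, 3], [1, 2, 3])

def Spec_ulam_distance (perm1 : List Int) (perm2 : List Int) (out : Int) : Prop := out = ulam_distance_alt perm1 perm2
instance (perm1 : List Int) (perm2 : List Int) (out : Int) : Decidable (Spec_ulam_distance perm1 perm2 out) := by unfold Spec_ulam_distance; infer_instance

-- ===== CLAIM (what is proved, stated in full; the proofs are below) =====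
def Claim_equal_ulam_distance : Prop := ∀ (perm1 : List Int) (perm2 : List Int), Dom_ulam_distance perm1 perm2 → Pre_ulam_distance perm1 perm2 → Spec_ulam_distance perm1 perm2 (ulam_distance perm1 perm2)

-- ===== LEMMAS AND PROOFS =====

-- B's dp loop viewed as a loop on (value, dp-value) pairs, so that the full list m
-- disappears from the state.
def pvStepSt (st : List (Int × Int)) (v : Int) : List (Int × Int) :=
  st ++ [(v, pvBestB st v + 1)]

-- The bisimulation invariant between A's tails list `lis` and B's pair state `st`:
-- dp values are ≥ 1; k < lis.length iff some pair has dp value > k; and lis[k] is the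
-- least first component among pairs with dp value > k.
def pvInv (st : List (Int × Int)) (lis : List Int) : Prop :=
  (∀ p ∈ st, (1 : Int) ≤ p.2) ∧
  (∀ k : Nat, (∃ p ∈ st, (k : Int) < p.2) ↔ k < lis.length) ∧
  (∀ (k : Nat) (h : k < lis.length),
    (∃ p ∈ st, (k : Int) < p.2 ∧ p.1 = lis[k]) ∧
    (∀ p ∈ st, (k : Int) < p.2 → lis[k] ≤ p.1))

theorem pvInv_nil : pvInv [] [] := by
  refine ⟨by simp, by simp, by simp⟩

theorem pvBestB_spec (v : Int) : ∀ (st : List (Int × Int)) (b : Int),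
    b ≤ st.foldl (fun best p => if p.1 < v ∧ best < p.2 then p.2 else best) b ∧
    (∀ p ∈ st, p.1 < v → p.2 ≤ st.foldl (fun best p => if p.1 < v ∧ best < p.2 then p.2 else best) b) ∧
    (st.foldl (fun best p => if p.1 < v ∧ best < p.2 then p.2 else best) b = b ∨
      ∃ p ∈ st, p.1 < v ∧ st.foldl (fun best p => if p.1 < v ∧ best < p.2 then p.2 else best) b = p.2) := by
  intro st
  induction st with
  | nil => intro b; simp
  | cons p t ih =>
    intro b
    simp only [List.foldl_cons]
    obtain ⟨h1, h2, h3⟩ := ih (if p.1 < v ∧ b < p.2 then p.2 else b)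
    refine ⟨?_, ?_, ?_⟩
    · exact le_trans (by split_ifs with h; exact le_of_lt h.2; exact le_rfl) h1
    · intro q hq hqv
      rcases List.mem_cons.mp hq with hq | hq
      · subst hq
        by_cases hb : b < q.2
        · simpa [hqv, hb] using h1
        · exact le_trans (le_trans (le_of_not_gt hb) (by split_ifs with h; exact le_of_lt h.2; exact le_rfl)) h1
      · exact h2 q hq hqv
    · rcases h3 with h3 | ⟨q, hq, hqv, he⟩
      · by_cases h : p.1 < v ∧ b < p.2
        · exact Or.inr ⟨p, by simp, h.1, by simpa [h] using h3⟩
        · exact Or.inl (by simpa [h] using h3)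
      · exact Or.inr ⟨q, by simp [hq], hqv, he⟩

theorem pvInv_sorted {st : List (Int × Int)} {lis : List Int} (hInv : pvInv st lis) :
    lis.Pairwise (fun a b => a ≤ b) := by
  obtain ⟨_, _, h3⟩ := hInv
  rw [List.pairwise_iff_getElem]
  intro i j hi hj hij
  obtain ⟨⟨p, hp, hpd, hpv⟩, _⟩ := h3 j hj
  have := (h3 i hi).2 p hp (lt_of_le_of_lt (by exact_mod_cast Nat.le_of_lt hij) hpd)
  omega

theorem pvInv_step {st : List (Int × Int)} {lis : List Int} (hInv : pvInv st lis) (v : Int) :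
    pvInv (pvStepSt st v) (pvStepA lis v) := by
  obtain ⟨h1, h2, h3⟩ := hInv
  have hsorted := pvInv_sorted ⟨h1, h2, h3⟩
  obtain ⟨hposle, hlt, hge⟩ := PySem.List.bisectLeft_spec lis v hsorted
  set pos := PySem.List.bisectLeft lis v with hposdef
  obtain ⟨hbge0, hble, hbcases⟩ := pvBestB_spec v st 0
  have hfold : st.foldl (fun best p => if p.1 < v ∧ best < p.2 then p.2 else best) 0 = pvBestB st v := rfl
  rw [hfold] at hbge0 hble hbcases
  set best := pvBestB st v with hbestdef
  -- pos = best
  have hbest_ge : (pos : Int) ≤ best := by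
    rcases Nat.eq_zero_or_pos pos with h0 | h0
    · simp [h0]; exact hbge0
    · have hk : pos - 1 < lis.length := by omega
      obtain ⟨⟨p, hp, hpd, hpv⟩, _⟩ := h3 (pos - 1) hk
      have hlt' : lis[pos - 1] < v := hlt (pos - 1) hk (by omega)
      have := hble p hp (by rw [hpv]; exact hlt')
      omega
  have hbest_le : best ≤ (pos : Int) := by
    rcases hbcases with h | ⟨p, hp, hpv, he⟩
    · rw [h]; exact_mod_cast Nat.zero_le pos
    · by_contra hcon
      have hd : (pos : Int) < p.2 := by rw [he] at hcon; omega
      have hposlt : pos < lis.length := (h2 pos).mp ⟨p, hp, hd⟩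
      have hvle : v ≤ lis[pos] := hge pos hposlt le_rfl
      have := (h3 pos hposlt).2 p hp hd
      omega
  have hpb : (pos : Int) = best := le_antisymm hbest_ge hbest_le
  unfold pvStepSt pvStepA
  rw [← hbestdef, ← hposdef]
  by_cases hcase : pos = lis.length
  · -- append case
    rw [if_pos hcase]
    refine ⟨?_, ?_, ?_⟩
    · intro p hp
      rcases List.mem_append.mp hp with hp | hp
      · exact h1 p hp
      · simp at hp; subst hp; simp; omega
    · intro k
      constructor
      · rintro ⟨p, hp, hpd⟩
        rcases List.mem_append.mp hp with hp | hp
        · have := (h2 k).mp ⟨p, hp, hpd⟩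
          simp; omega
        · simp at hp; subst hp; simp at hpd
          simp
          omega
      · intro hk
        simp at hk
        by_cases hk' : k < lis.length
        · obtain ⟨p, hp, hpd⟩ := (h2 k).mpr hk'
          exact ⟨p, List.mem_append_left _ hp, hpd⟩
        · have hkeq : k = lis.length := by omega
          refine ⟨(v, best + 1), List.mem_append_right _ (by simp), ?_⟩
          simp [hkeq, hcase] at hpb ⊢
          omega
    · intro k hk
      simp at hk
      by_cases hk' : k < lis.length
      · obtain ⟨⟨p, hp, hpd, hpv⟩, hlb⟩ := h3 k hk'
        have hgk : (lis ++ [v])[k] = lis[k] := List.getElem_append_left hk'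
        refine ⟨⟨p, List.mem_append_left _ hp, hpd, by rw [hgk]; exact hpv⟩, ?_⟩
        intro q hq hqd
        rcases List.mem_append.mp hq with hq | hq
        · rw [hgk]; exact hlb q hq hqd
        · simp at hq; subst hq
          rw [hgk]
          exact le_of_lt (hlt k hk' (by omega))
      · have hkeq : k = lis.length := by omega
        have hgk : (lis ++ [v])[k] = v := by
          subst hkeq; simp
        refine ⟨⟨(v, best + 1), List.mem_append_right _ (by simp), ?_, by rw [hgk]⟩, ?_⟩
        · simp [hkeq, hcase] at hpb ⊢; omega
        · intro q hq hqd
          rcases List.mem_append.mp hq with hq | hq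
          · exfalso
            have := (h2 k).mp ⟨q, hq, hqd⟩
            omega
          · simp at hq; subst hq; rw [hgk]
  · -- replace case
    have hposlt : pos < lis.length := lt_of_le_of_ne hposle hcase
    simp only [if_neg hcase]
    have hlen : (lis.set pos v).length = lis.length := by simp
    have hvle : v ≤ lis[pos] := hge pos hposlt le_rfl
    refine ⟨?_, ?_, ?_⟩
    · intro p hp
      rcases List.mem_append.mp hp with hp | hp
      · exact h1 p hp
      · simp at hp; subst hp; simp; omega
    · intro k
      rw [hlen]
      constructor
      · rintro ⟨p, hp, hpd⟩
        rcases List.mem_append.mp hp with hp | hp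
        · exact (h2 k).mp ⟨p, hp, hpd⟩
        · simp at hp; subst hp; simp at hpd
          omega
      · intro hk
        obtain ⟨p, hp, hpd⟩ := (h2 k).mpr hk
        exact ⟨p, List.mem_append_left _ hp, hpd⟩
    · intro k hk
      rw [hlen] at hk
      rcases lt_trichotomy k pos with hkp | hkp | hkp
      · have hgk : (lis.set pos v)[k]'(by omega) = lis[k] := List.getElem_set_ne (by omega) _
        obtain ⟨⟨p, hp, hpd, hpv⟩, hlb⟩ := h3 k hk
        refine ⟨⟨p, List.mem_append_left _ hp, hpd, by rw [hgk]; exact hpv⟩, ?_⟩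
        intro q hq hqd
        rcases List.mem_append.mp hq with hq | hq
        · rw [hgk]; exact hlb q hq hqd
        · simp at hq; subst hq; rw [hgk]
          exact le_of_lt (hlt k hk hkp)
      · have hgk : (lis.set pos v)[k]'(by omega) = v := by
          simp [hkp]
        refine ⟨⟨(v, best + 1), List.mem_append_right _ (by simp), by omega, by rw [hgk]⟩, ?_⟩
        intro q hq hqd
        rcases List.mem_append.mp hq with hq | hq
        · rw [hgk]
          exact le_trans hvle ((h3 pos hposlt).2 q hq (by omega))
        · simp at hq; subst hq; rw [hgk]
      · have hgk : (lis.set pos v)[k]'(by omega) = lis[k] := List.getElem_set_ne (by omega) _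
        obtain ⟨⟨p, hp, hpd, hpv⟩, hlb⟩ := h3 k hk
        refine ⟨⟨p, List.mem_append_left _ hp, hpd, by rw [hgk]; exact hpv⟩, ?_⟩
        intro q hq hqd
        rcases List.mem_append.mp hq with hq | hq
        · rw [hgk]; exact hlb q hq hqd
        · simp at hq; subst hq
          simp at hqd
          omega

theorem pvInv_foldl (m : List Int) : ∀ (st : List (Int × Int)) (lis : List Int),
    pvInv st lis → pvInv (m.foldl pvStepSt st) (m.foldl pvStepA lis) := by
  induction m with
  | nil => intro st lis h; simpa using h
  | cons v t ih =>
    intro st lis h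
    simpa using ih _ _ (pvInv_step h v)

-- B's dp fold equals the pair fold, projected to dp values.
theorem pvDpB_eq_pairs (m : List Int) : ∀ (l : List Int) (pre : List Int) (dp : List Int),
    m = pre ++ l → pre.length = dp.length →
    l.foldl (pvStepB m) dp = (l.foldl pvStepSt (pre.zip dp)).map Prod.snd := by
  intro l
  induction l with
  | nil =>
    intro pre dp hm hlen
    simpa using (List.map_snd_zip (le_of_eq hlen.symm)).symm
  | cons v t ih =>
    intro pre dp hm hlen
    have hzip : m.zip dp = pre.zip dp := by
      rw [hm]
      calc (pre ++ (v :: t)).zip dp = (pre ++ (v :: t)).zip (dp ++ []) := by simp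
        _ = pre.zip dp ++ (v :: t).zip ([] : List Int) := List.zip_append hlen
        _ = pre.zip dp := by simp
    have hstep : pvStepB m dp v = dp ++ [pvBestB (pre.zip dp) v + 1] := by
      unfold pvStepB; rw [hzip]
    simp only [List.foldl_cons, hstep]
    have hzip2 : (pre ++ [v]).zip (dp ++ [pvBestB (pre.zip dp) v + 1]) =
        pre.zip dp ++ [(v, pvBestB (pre.zip dp) v + 1)] := by
      rw [List.zip_append hlen]; simp
    rw [ih (pre ++ [v]) (dp ++ [pvBestB (pre.zip dp) v + 1]) (by rw [hm]; simp) (by simp [hlen])]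
    unfold pvStepSt
    rw [hzip2]

-- max(dp, default=0) of the final state equals lis.length under the invariant.
theorem pvFinal {st : List (Int × Int)} {lis : List Int} (hInv : pvInv st lis) :
    (match PySem.List.max? (st.map Prod.snd) (fun x => x) with
     | some x => x
     | none => 0) = (lis.length : Int) := by
  obtain ⟨h1, h2, h3⟩ := hInv
  by_cases hst : st = []
  · have hlen0 : lis.length = 0 := by
      by_contra h
      obtain ⟨p, hp, _⟩ := (h2 0).mpr (by omega)
      rw [hst] at hp; simp at hp
    have hmax : PySem.List.max? (st.map Prod.snd) (fun x => x) = none := by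
      rw [hst]; exact (PySem.List.max?_eq_none_iff _ _).mpr rfl
    rw [hmax, hlen0]
    simp
  · have hne : st.map Prod.snd ≠ [] := by
      intro h; exact hst (List.map_eq_nil_iff.mp h)
    have hsome : PySem.List.max? (st.map Prod.snd) (fun x => x) ≠ none :=
      fun h => hne ((PySem.List.max?_eq_none_iff _ _).mp h)
    obtain ⟨M, hM⟩ := Option.ne_none_iff_exists'.mp hsome
    rw [hM]
    show M = (lis.length : Int)
    have hMmem : M ∈ st.map Prod.snd := PySem.List.max?_mem hM
    have hMmax : ∀ y ∈ st.map Prod.snd, y ≤ M := by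
      intro y hy; exact PySem.List.max?_isMax hM y hy
    obtain ⟨p, hp, hpM⟩ := List.mem_map.mp hMmem
    have hM1 : (1 : Int) ≤ M := hpM ▸ h1 p hp
    obtain ⟨q, hq⟩ := List.exists_mem_of_ne_nil st hst
    have hlen_pos : 0 < lis.length := by
      have : (0 : Int) < q.2 := by have := h1 q hq; omega
      exact (h2 0).mp ⟨q, hq, this⟩
    obtain ⟨r, hr, hrd⟩ := (h2 (lis.length - 1)).mpr (by omega)
    have hle1 : (lis.length : Int) ≤ M := by
      have := hMmax r.2 (List.mem_map.mpr ⟨r, hr, rfl⟩)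
      omega
    have hle2 : M ≤ (lis.length : Int) := by
      have hk : ((M - 1).toNat : Int) = M - 1 := by omega
      have : (M - 1).toNat < lis.length := (h2 (M - 1).toNat).mp ⟨p, hp, by omega⟩
      omega
    omega

theorem pvMapped_eq (perm1 perm2 : List Int) : pvMappedA perm1 perm2 = pvMappedB perm1 perm2 := rfl

-- ===== VERDICT (by name: the statement is the Claim_ definition above) =====
theorem ulam_distance_spec : Claim_equal_ulam_distance := by
  intro perm1 perm2 _hDom _hPre
  unfold Spec_ulam_distance ulam_distance ulam_distance_alt
  rw [← pvMapped_eq]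
  set m := pvMappedA perm1 perm2 with hm
  have hInv := pvInv_foldl m [] [] pvInv_nil
  have hdp : m.foldl (pvStepB m) [] = (m.foldl pvStepSt []).map Prod.snd := by
    have := pvDpB_eq_pairs m m [] [] (by simp) rfl
    simpa using this
  simp only [hdp]
  rw [pvFinal (by simpa using hInv)]
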